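/- GENERATED by tools/from_farm_form.py from prooffarm-gif/accepted/DGifGetImageHeader.1/Lemmas.lean (a worked proof of the farm's unit `DGifGetImageHeader.1`,
   accepted by the verdict) — do not edit. -/
import Gif.Spec.Units.DGifGetImageHeader_1
import Gif.Spec.AllSegs

/-!
  Lemmas for the unit `DGifGetImageHeader.1` (the BODY of a protected function: two checked field loads, then three calls of
  `DGifGetWord` into scalar fields of gif, with a shared error exit): the segment is walked in FOUR STEPS that meet at the three
  calls' return addresses (`ret4`, `ret5`, `ret6`), with the design's own assertion `DGifGetImageHeader.Mid` there (`Body` +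
  `r12 = Private`: no path needs the callee's result — a failed word needs only `r13d = 0`, a good one only `Back`).

  THE PURE STEPS (no walk; shared by the three calls and the two kinds of exit)
      gih1_body_after_word   `Body` again behind a call of `DGifGetWord`: the slots over the pushed return address and through the
                             callee's footprint, `inv ok rem` from `Back`, `same` by `u_same`
      gih1_word_pre          `DGifGetWord`'s precondition at its entry (`Env.at_call`; `rsi` inside `[gif + 40, gif + 64)`)
      gih1_body_moved        `Body` along instructions that store nothing
      gih1_done_of_fail      `Done` behind `mov r13d, 0 ; jmp 108E78H`
  THE WALKS
      gih1_seg_first         0x108e49 … the checked loads of `Private`, `FileState` (NOT_READABLE is dead: `Shape.state` as the load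
                             fact `l_state`, the walker prunes the arm) … the first call … 0x108ea1 (ret4)
      gih1_seg_second        0x108ea1 … the second call … 0x108eb9 (ret5) | the failed word … 0x108e78
      gih1_seg_third         0x108eb9 … the third call … 0x108ec9 (ret6) | the failed word … 0x108e78
      gih1_seg_fourth        0x108ec9 … 0x108ecd | the failed word … 0x108e78

  The general lemmas are those of Gif/Spec/FrameCarry.lean §5 (`Env.at_call`) and Gif/Spec/Common.lean (`rem_sameExcept`).
-/

open X86 X86.User Asan ProgX.Base ProgX.Base.Spec Gif.Spec

set_option maxRecDepth 4000
set_option maxHeartbeats 4000000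

namespace Gif.Spec.DGifGetImageHeader_1

/-- **`Body` behind a call of `DGifGetWord(gif, a)`** from a body state `v` (`Body` at any cut): the callee was entered at `s` — `v`
but for the pushed return address `x` at `RA − 144` — with `a` a word field of `gif.Image` (`[gif + 40, gif + 64)`), and has
returned at `sr` with its footprint `hsame` and its post `Back`: the slots, the return address, the invariants and the footprint of
`Body` hold again at `sr`, at the address `cut`. The three calls of the segment share this step. (`Lay`, `hLay`: what `v_entry` reads.) -/
theorem gih1_body_after_word (Lay : Layout) (hLay : Lay.hi = 0x1000000) {cut0 cut : Word} {H : Heap} {rest : List Obj} {frames : List (Nat × FrameLayout)} {F : Forest} {R : Rd}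
    {u₀ e : State} {ret : Word} {v s sr : State} {x : Nat} {a : Word}
    (hbody : DGifGetImageHeader.Body cut0 H rest frames F R H F u₀ e ret v)
    (hmem : s.mem = v.mem.writeLE (e.reg .rsp - 144) 8 x)
    (hrsp : s.reg .rsp = e.reg .rsp - 144)
    (ha1 : F.gif + 40 ≤ a.toNat) (ha2 : a.toNat + 4 ≤ F.gif + 64)
    (hsame_c : Mem.SameExcept
      [⟨(e.reg .rsp - 144).toNat - 272, (e.reg .rsp - 144).toNat⟩,
       ⟨a.toNat, a.toNat + 4⟩,
       ⟨F.gif + 96, F.gif + 100⟩,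
       ⟨R.cur, R.cur + 8⟩] (v.mem.writeLE (e.reg .rsp - 144) 8 x) sr.mem)
    (hback : Back H rest (DGifGetImageHeader.framesIn frames e) F R s sr)
    (hrip : sr.rip = cut) (hrsp' : sr.reg .rsp = e.reg .rsp - 136)
    (hrbx : sr.reg .rbx = v.reg .rbx) (hrbp : sr.reg .rbp = v.reg .rbp)
    (hcode : (conv u₀).code.In sr.mem) (habi : (conv u₀).inv sr) :
    DGifGetImageHeader.Body cut H rest frames F R H F u₀ e ret sr := by
  have he := hbody.entry
  v_entry he
  obtain ⟨henv, hrdi⟩ := hbody.pre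
  have hcur := henv.ctx.cursor_range henv.heap.inv.shadow
  have hgin := henv.ok.owns.inside henv.heap.inv.heap (o := (F.gif, 120)) List.mem_cons_self
  have hbase := henv.heap.base
  simp only at hgin
  rw [hbase] at hgin
  have hg_lo : 8388608 + 64 ≤ F.gif := hgin.1
  have hg_hi : F.gif + 120 + 32 ≤ 12582912 := hgin.2.2.2.2
  clear hgin he_align
  -- the slots and the footprint of `Body` at `v`
  have k_r15 : v.mem.readLE (e.reg .rsp - 8) 8 = (e.reg .r15).toNat := hbody.slot_r15
  have k_r14 : v.mem.readLE (e.reg .rsp - 16) 8 = (e.reg .r14).toNat := hbody.slot_r14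
  have k_r13 : v.mem.readLE (e.reg .rsp - 24) 8 = (e.reg .r13).toNat := hbody.slot_r13
  have k_r12 : v.mem.readLE (e.reg .rsp - 32) 8 = (e.reg .r12).toNat := hbody.slot_r12
  have k_rbp : v.mem.readLE (e.reg .rsp - 40) 8 = (e.reg .rbp).toNat := hbody.slot_rbp
  have k_rbx : v.mem.readLE (e.reg .rsp - 48) 8 = (e.reg .rbx).toNat := hbody.slot_rbx
  have k_ra : UInt64.ofNat (v.mem.readLE (e.reg .rsp) 8) = ret := hbody.slot_ra
  have hsame : Mem.SameExcept
    [⟨(e.reg .rsp).toNat - 448, (e.reg .rsp).toNat⟩,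
     shadowSpan ((e.reg .rsp).toNat - 120) ((e.reg .rsp).toNat - 56),
     ⟨0x800000, 0x1000020⟩,
     ⟨R.cur, R.cur + 8⟩] e.mem v.mem := hbody.same
  simp only [shadowSpan] at hsame
  -- the reader at the callee's entry is where it was at `v`: only a return address was pushed
  have hs0 : Mem.SameExcept [⟨(e.reg .rsp).toNat - 448, (e.reg .rsp).toNat - 136⟩] v.mem s.mem := by
    rw [hmem]
    u_same
  have hrem0 : rem R s.mem = rem R v.mem := by
    apply rem_sameExcept hs0 (by omega)
    intro w hw
    have e := List.mem_singleton.mp hw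
    rw [e]
    simp only
    omega
  have e_top : (s.reg .rsp).toNat + 8 = (e.reg .rsp).toNat - 136 := by
    rw [hrsp]
    u_omega
  -- each slot over the pushed return address (first step) and through the callee's footprint (second step)
  have w_same := hsame_c
  have hp15 : (v.mem.writeLE (e.reg .rsp - 144) 8 x).readLE (e.reg .rsp - 8) 8 = (e.reg .r15).toNat := by u_frame k_r15
  have hs15 : sr.mem.readLE (e.reg .rsp - 8) 8 = (e.reg .r15).toNat := by u_frame hp15
  have hp14 : (v.mem.writeLE (e.reg .rsp - 144) 8 x).readLE (e.reg .rsp - 16) 8 = (e.reg .r14).toNat := by u_frame k_r14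
  have hs14 : sr.mem.readLE (e.reg .rsp - 16) 8 = (e.reg .r14).toNat := by u_frame hp14
  have hp13 : (v.mem.writeLE (e.reg .rsp - 144) 8 x).readLE (e.reg .rsp - 24) 8 = (e.reg .r13).toNat := by u_frame k_r13
  have hs13 : sr.mem.readLE (e.reg .rsp - 24) 8 = (e.reg .r13).toNat := by u_frame hp13
  have hp12 : (v.mem.writeLE (e.reg .rsp - 144) 8 x).readLE (e.reg .rsp - 32) 8 = (e.reg .r12).toNat := by u_frame k_r12
  have hs12 : sr.mem.readLE (e.reg .rsp - 32) 8 = (e.reg .r12).toNat := by u_frame hp12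
  have hpbp : (v.mem.writeLE (e.reg .rsp - 144) 8 x).readLE (e.reg .rsp - 40) 8 = (e.reg .rbp).toNat := by u_frame k_rbp
  have hsbp : sr.mem.readLE (e.reg .rsp - 40) 8 = (e.reg .rbp).toNat := by u_frame hpbp
  have hpbx : (v.mem.writeLE (e.reg .rsp - 144) 8 x).readLE (e.reg .rsp - 48) 8 = (e.reg .rbx).toNat := by u_frame k_rbx
  have hsbx : sr.mem.readLE (e.reg .rsp - 48) 8 = (e.reg .rbx).toNat := by u_frame hpbx
  have hpra : UInt64.ofNat ((v.mem.writeLE (e.reg .rsp - 144) 8 x).readLE (e.reg .rsp) 8) = ret := by u_frame k_ra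
  have hsra : UInt64.ofNat (sr.mem.readLE (e.reg .rsp) 8) = ret := by u_frame hpra
  -- the footprint since the entry: the callee's windows lie inside the function's
  have hsame1 : Mem.SameExcept
    [⟨(e.reg .rsp).toNat - 448, (e.reg .rsp).toNat⟩,
     shadowSpan ((e.reg .rsp).toNat - 120) ((e.reg .rsp).toNat - 56),
     ⟨0x800000, 0x1000020⟩,
     ⟨R.cur, R.cur + 8⟩] e.mem sr.mem := by
    simp only [shadowSpan]
    u_same
  exact {
    entry := hbody.entry
    pre := hbody.pre
    rip := hrip
    rsp := hrsp'
    rbx := hrbx.trans hbody.rbx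
    rbp := hrbp.trans hbody.rbp
    slot_r15 := hs15
    slot_r14 := hs14
    slot_r13 := hs13
    slot_r12 := hs12
    slot_rbp := hsbp
    slot_rbx := hsbx
    slot_ra := hsra
    inv := by
      rw [← e_top]
      exact hback.inv
    region := hbody.region
    forest := hbody.forest
    ok := hback.ok
    rem := by
      refine Nat.le_trans hback.rem ?_
      rw [hrem0]
      exact hbody.rem
    same := hsame1
    code := hcode
    abi := habi
  }

/-- **The precondition of `DGifGetWord(gif, a)` at its entry `s`**, called from a body state `v` (`Body` at any cut): `s` is `v` but for
the pushed return address `x` at `RA − 144`; `rdi = gif`; `rsi = a`, a word field of `gif.Image` (`[gif + 40, gif + 64)`). The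
environment is the body's, for the frame list with the own frame in front (`Env.at_call`). -/
theorem gih1_word_pre (Lay : Layout) (hLay : Lay.hi = 0x1000000) {cut0 : Word} {H : Heap} {rest : List Obj}
    {frames : List (Nat × FrameLayout)} {F : Forest} {R : Rd} {u₀ e : State} {ret : Word} {v s : State} {x : Nat} {a : Word}
    (hbody : DGifGetImageHeader.Body cut0 H rest frames F R H F u₀ e ret v)
    (hmem : s.mem = v.mem.writeLE (e.reg .rsp - 144) 8 x)
    (hrsp : s.reg .rsp = e.reg .rsp - 144)
    (hrdi_s : s.reg .rdi = e.reg .rdi)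
    (hrsi : s.reg .rsi = a)
    (ha1 : F.gif + 40 ≤ a.toNat) (ha2 : a.toNat + 4 ≤ F.gif + 64) :
    (DGifGetWord.spec H rest (DGifGetImageHeader.framesIn frames e) F R).pre s := by
  have he := hbody.entry
  v_entry he
  obtain ⟨henv, hrdi⟩ := hbody.pre
  -- only the return address was pushed since `v`
  have hs : Mem.SameExcept [⟨(e.reg .rsp).toNat - 448, (e.reg .rsp).toNat - 136⟩] v.mem s.mem := by
    rw [hmem]
    u_same
  have henv' : Env H rest (DGifGetImageHeader.framesIn frames e) F R s := by
    refine henv.at_call hbody.inv hbody.ok hs (by omega) (by omega) ?_ ?_ ?_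
    · rw [hrsp]
      u_omega
    · rw [hrsp]
      u_omega
    · rw [hrsp]
      u_omega
  refine ⟨henv', ?_, Or.inr ⟨?_, ?_⟩⟩
  · rw [hrdi_s]
    exact hrdi
  · rw [hrsi]
    exact ha1
  · rw [hrsi]
    exact ha2

/-- **`Body` moves along instructions that store nothing** (`test`, a jump, `mov r13d, 0`): from `Body` at `v` to `Body` at the address
`cut` of a state `s` with the same memory, stack pointer, `rbx` and `rbp`. -/
theorem gih1_body_moved {cut0 cut : Word} {H : Heap} {rest : List Obj} {frames : List (Nat × FrameLayout)} {F : Forest} {R : Rd}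
    {u₀ e : State} {ret : Word} {v s : State}
    (hbody : DGifGetImageHeader.Body cut0 H rest frames F R H F u₀ e ret v)
    (hmem : s.mem = v.mem)
    (hrip : s.rip = cut) (hrsp : s.reg .rsp = e.reg .rsp - 136)
    (hrbx : s.reg .rbx = v.reg .rbx) (hrbp : s.reg .rbp = v.reg .rbp)
    (hcode : (conv u₀).code.In s.mem) (habi : (conv u₀).inv s) :
    DGifGetImageHeader.Body cut H rest frames F R H F u₀ e ret s := by
  exact {
    entry := hbody.entry
    pre := hbody.pre
    rip := hrip
    rsp := hrsp
    rbx := hrbx.trans hbody.rbx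
    rbp := hrbp.trans hbody.rbp
    slot_r15 := by
      rw [hmem]
      exact hbody.slot_r15
    slot_r14 := by
      rw [hmem]
      exact hbody.slot_r14
    slot_r13 := by
      rw [hmem]
      exact hbody.slot_r13
    slot_r12 := by
      rw [hmem]
      exact hbody.slot_r12
    slot_rbp := by
      rw [hmem]
      exact hbody.slot_rbp
    slot_rbx := by
      rw [hmem]
      exact hbody.slot_rbx
    slot_ra := by
      rw [hmem]
      exact hbody.slot_ra
    inv := by
      rw [hmem]
      exact hbody.inv
    region := hbody.region
    forest := hbody.forest
    ok := by
      rw [hmem]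
      exact hbody.ok
    rem := by
      rw [hmem]
      exact hbody.rem
    same := by
      rw [hmem]
      exact hbody.same
    code := hcode
    abi := habi
  }

/-- **`Done` from a body state with a failed word** (108EA5H `mov r13d, 0 ; jmp 108E78H`): nothing was stored since the body state
`v`, `r13d = 0`: `Body` at the epilogue's cut, the result GIF_ERROR, and the success clause is void. -/
theorem gih1_done_of_fail {cut0 : Word} {H : Heap} {rest : List Obj} {frames : List (Nat × FrameLayout)} {F : Forest} {R : Rd}
    {u₀ e : State} {ret : Word} {v s : State}
    (hbody : DGifGetImageHeader.Body cut0 H rest frames F R H F u₀ e ret v)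
    (hmem : s.mem = v.mem)
    (hrip : s.rip = Gif.L.DGifGetImageHeader.at_108e78) (hrsp : s.reg .rsp = e.reg .rsp - 136)
    (hrbx : s.reg .rbx = v.reg .rbx) (hrbp : s.reg .rbp = v.reg .rbp)
    (hr13 : s.reg .r13 = Word.ofBV 0#32)
    (hcode : (conv u₀).code.In s.mem) (habi : (conv u₀).inv s) :
    DGifGetImageHeader.Done H rest frames F R H F u₀ e ret s := by
  have h0 : (s.reg .r13).toNat % 2 ^ 32 = 0 := by
    rw [hr13]
    decide
  exact {
    body := gih1_body_moved hbody hmem hrip hrsp hrbx hrbp hcode habi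
    res := Or.inr h0
    lz := by
      intro h1
      rw [h0] at h1
      exact absurd h1 (by decide)
  }

/-- **108E49H … the first call of DGifGetWord … 108EA1H (ret4)**. -/
theorem gih1_seg_first (Lay : Layout) (hLay : Lay.hi = 0x1000000) (μ : Microarch) (hμ : UserX.MicroOK μ) (u₀ : State)
    (hcode : HasCodeNat Lay u₀ Gif.L.DGifGetImageHeader.entry Gif.Code.code_DGifGetImageHeader.nat Gif.L.DGifGetImageHeader.size)
    (H : Heap) (rest : List Obj) (frames : List (Nat × FrameLayout)) (F : Forest) (R : Rd) (e : State) (ret : Word)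
    (h_DGifGetWord : Calls Lay μ ProgX.Base.WayInv (ProgX.Base.conv u₀) Gif.L.DGifGetWord.entry
      (Gif.Spec.DGifGetWord.spec H rest (DGifGetImageHeader.framesIn frames e) F R))
    (h_asan_load8_noabort : Asan.SmallCheck Lay μ ProgX.Base.WayInv (ProgX.Base.CodeOK u₀) [.rax, .rcx, .rdx] 8 ProgX.Base.L.__asan_load8_noabort.entry)
    (h_asan_load4_noabort : Asan.SmallCheck Lay μ ProgX.Base.WayInv (ProgX.Base.CodeOK u₀) [.rax, .rcx, .rdx] 4 ProgX.Base.L.__asan_load4_noabort.entry)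
    (v : State) (hat : DGifGetImageHeader.AfterPrologue H rest frames F R u₀ e ret v) :
    ReachVia Lay μ ProgX.Base.WayInv v (DGifGetImageHeader.Mid Gif.L.DGifGetImageHeader.ret4 H rest frames F R H F u₀ e ret) := by
  -- THE PRELUDE: the entry assertion `AfterPrologue` = `Body` + `rdi = gif` still
  obtain ⟨hbody, c_rdi⟩ := hat
  have he := hbody.entry
  v_entry he
  obtain ⟨henv, hrdi⟩ := hbody.pre
  -- what the walker reads of a segment's entry state: rip, rsp / rbx (as `c_…`), the registers kept, the text, DF / MXCSR
  have w_rip := hbody.rip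
  have c_rsp : v.reg .rsp = e.reg .rsp - 136 := hbody.rsp
  have c_rbx : v.reg .rbx = e.reg .rdi := hbody.rbx
  have w_kept : RegsKept [.rsp] v v := RegsKept.refl _ _
  have w_eq : Mem.EqOn ProgX.Base.L.textLo ProgX.Base.L.textHi u₀.mem v.mem := ProgX.Base.conv_code_eqOn hbody.code
  have hdf := (show abiInv _ from hbody.abi).1
  have hmx := (show abiInv _ from hbody.abi).2
  have hsse := ProgX.Base.sseOK_of_abiInv hbody.abi
  -- where the cursor, gif and pv are, as numbers (only the bounds: the `% 16` clauses stay out of `omega`'s way)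
  have hcur := henv.ctx.cursor_range henv.heap.inv.shadow
  have hgin := henv.ok.owns.inside henv.heap.inv.heap (o := (F.gif, 120)) List.mem_cons_self
  have hpin := henv.ok.owns.inside henv.heap.inv.heap (o := (F.pv, 24936)) (List.mem_cons_of_mem _ List.mem_cons_self)
  have hbase := henv.heap.base
  simp only at hgin hpin
  rw [hbase] at hgin hpin
  have hg_lo : 8388608 + 64 ≤ F.gif := hgin.1
  have hg_hi : F.gif + 120 + 32 ≤ 12582912 := hgin.2.2.2.2
  have hp_lo : 8388608 + 64 ≤ F.pv := hpin.1
  have hp_hi : F.pv + 24936 + 32 ≤ 12582912 := hpin.2.2.2.2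
  clear hgin hpin
  -- the two loads, as facts about the memory at `v` in the walker's form: `gif.Private = pv` [G2], `pv.FileState = 8` [PR3]
  have hpriv := hbody.ok.shape.priv
  have hstate := hbody.ok.shape.state
  simp only [gfield] at hpriv hstate
  have l_priv : v.mem.readLE (e.reg .rdi + 0x70) 8 = F.pv := by
    rw [rd_eq_readLE v.mem (e.reg .rdi + 0x70) (F.gif + 112) 8 (by u_omega)]
    exact hpriv
  have l_state : v.mem.readLE (UInt64.ofNat F.pv) 4 = 8 := by
    rw [rd_eq_readLE v.mem (UInt64.ofNat F.pv) F.pv 4 (by u_omega)]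
    exact hstate
  -- gif and pv are live under the body's frames: what the two check goals ask
  have hgl : LiveIn (H.liveObjs ++ rest) (DGifGetImageHeader.framesIn frames e) F.gif 120 :=
    hbody.ok.gif_live.liveIn rest _ (Nat.le_refl _) (Nat.le_refl _)
  have hpl : LiveIn (H.liveObjs ++ rest) (DGifGetImageHeader.framesIn frames e) F.pv 24936 :=
    hbody.ok.pv_live.liveIn rest _ (Nat.le_refl _) (Nat.le_refl _)
  -- THE WALK, to the first call's return address (the arm l.368 is pruned: `8 &&& 8 ≠ 0`)
  u_walk hcode [hμ.vendor] until [Gif.L.DGifGetImageHeader.ret4] span [ProgX.Base.L.textLo, ProgX.Base.L.textHi] side (v_side)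
  case check_108e4d =>
    -- dgif_lib.c:364 the load of `gif->Private`: 8 bytes inside gif
    have hun : ShadowUntouched v.mem s_108e4d.mem := by v_untouched
    exact hgl.accSmall hbody.inv.shadow hun _ 8 (by decide) (by u_omega) (by u_omega)
  case check_108e59 =>
    -- dgif_lib.c:366 the load of `Private->FileState`: 4 bytes inside pv
    have hun : ShadowUntouched v.mem s_108e59.mem := by v_untouched
    exact hpl.accSmall hbody.inv.shadow hun _ 4 (by decide) (by u_omega) (by u_omega)
  case call_inv =>
    v_inv
  case pre_108e9c =>
    -- DGifGetWord's precondition: `rdi = gif`, `rsi = &gif->Image.Left` = gif + 40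
    exact gih1_word_pre Lay hLay hbody w_mem w_rsp w_rdi w_rsi (by u_omega) (by u_omega)
  -- 0x108ea1 (ret4): DGIFGETWORD HAS RETURNED
  obtain ⟨hback, _, _, _⟩ := w_post
  -- the callee's footprint in terms of `v`
  v_after_call w_rsp_108e9c w_mem_108e9c
  simp only [w_rsi_108e9c] at w_same
  -- `Body` again at ret4 …
  have hbody1 : DGifGetImageHeader.Body Gif.L.DGifGetImageHeader.ret4 H rest frames F R H F u₀ e ret s_108e9cr :=
    gih1_body_after_word Lay hLay hbody w_mem_108e9c w_rsp_108e9c (by u_omega) (by u_omega) w_same hback w_rip w_rsp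
      (w_kept.get .rbx rfl) (w_kept.get .rbp rfl) w_code w_inv
  -- … and `r12 = Private`
  refine ReachVia.done ?_
  exact {
    body := hbody1
    r12 := by
      rw [w_r12]
      u_omega
  }

/-- **108EA1H (ret4) … 108EB9H (ret5) or the epilogue's cut 108E78H** (dgif_lib.c:372-373): `test eax, eax`; GIF_ERROR: `r13d = 0`
(108EA5H) and to the epilogue; otherwise `DGifGetWord(gif, &gif->Image.Top)` (`gif + 44`). -/
theorem gih1_seg_second (Lay : Layout) (hLay : Lay.hi = 0x1000000) (μ : Microarch) (hμ : UserX.MicroOK μ) (u₀ : State)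
    (hcode : HasCodeNat Lay u₀ Gif.L.DGifGetImageHeader.entry Gif.Code.code_DGifGetImageHeader.nat Gif.L.DGifGetImageHeader.size)
    (H : Heap) (rest : List Obj) (frames : List (Nat × FrameLayout)) (F : Forest) (R : Rd) (e : State) (ret : Word)
    (h_DGifGetWord : Calls Lay μ ProgX.Base.WayInv (ProgX.Base.conv u₀) Gif.L.DGifGetWord.entry
      (Gif.Spec.DGifGetWord.spec H rest (DGifGetImageHeader.framesIn frames e) F R))
    (v : State) (hat : DGifGetImageHeader.Mid Gif.L.DGifGetImageHeader.ret4 H rest frames F R H F u₀ e ret v) :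
    ReachVia Lay μ ProgX.Base.WayInv v (fun w =>
      DGifGetImageHeader.Mid Gif.L.DGifGetImageHeader.ret5 H rest frames F R H F u₀ e ret w ∨
      DGifGetImageHeader.Done H rest frames F R H F u₀ e ret w) := by
  -- THE PRELUDE, as in `gih1_seg_first`; `eax` as a variable `z` (the branch fact of `test eax, eax` speaks of it)
  obtain ⟨hbody, hr12⟩ := hat
  have he := hbody.entry
  v_entry he
  obtain ⟨henv, hrdi⟩ := hbody.pre
  have w_rip := hbody.rip
  have c_rsp : v.reg .rsp = e.reg .rsp - 136 := hbody.rsp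
  have c_rbx : v.reg .rbx = e.reg .rdi := hbody.rbx
  obtain ⟨z, c_rax⟩ : ∃ z, v.reg .rax = z := ⟨_, rfl⟩
  have w_kept : RegsKept [.rsp] v v := RegsKept.refl _ _
  have w_eq : Mem.EqOn ProgX.Base.L.textLo ProgX.Base.L.textHi u₀.mem v.mem := ProgX.Base.conv_code_eqOn hbody.code
  have hdf := (show abiInv _ from hbody.abi).1
  have hmx := (show abiInv _ from hbody.abi).2
  have hsse := ProgX.Base.sseOK_of_abiInv hbody.abi
  have hcur := henv.ctx.cursor_range henv.heap.inv.shadow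
  have hgin := henv.ok.owns.inside henv.heap.inv.heap (o := (F.gif, 120)) List.mem_cons_self
  have hbase := henv.heap.base
  simp only at hgin
  rw [hbase] at hgin
  have hg_lo : 8388608 + 64 ≤ F.gif := hgin.1
  have hg_hi : F.gif + 120 + 32 ≤ 12582912 := hgin.2.2.2.2
  clear hgin
  -- THE WALK, both arms
  u_walk hcode [hμ.vendor] until [Gif.L.DGifGetImageHeader.ret5, Gif.L.DGifGetImageHeader.at_108e78]
    span [ProgX.Base.L.textLo, ProgX.Base.L.textHi] side (v_side)
  case call_inv =>
    v_inv
  case pre_108eb4 =>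
    -- DGifGetWord's precondition: `rdi = gif`, `rsi = &gif->Image.Top` = gif + 44
    exact gih1_word_pre Lay hLay hbody w_mem w_rsp w_rdi w_rsi (by u_omega) (by u_omega)
  · -- 0x108eb9 (ret5): DGIFGETWORD HAS RETURNED
    obtain ⟨hback, _, _, _⟩ := w_post
    -- the callee's footprint in terms of `v`
    v_after_call w_rsp_108eb4 w_mem_108eb4
    simp only [w_rsi_108eb4] at w_same
    -- `Body` again at ret5, and `r12 = Private` still
    have hbody1 : DGifGetImageHeader.Body Gif.L.DGifGetImageHeader.ret5 H rest frames F R H F u₀ e ret s_108eb4r :=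
      gih1_body_after_word Lay hLay hbody w_mem_108eb4 w_rsp_108eb4 (by u_omega) (by u_omega) w_same hback w_rip w_rsp
        (w_kept.get .rbx rfl) (w_kept.get .rbp rfl) w_code w_inv
    refine ReachVia.done (Or.inl ?_)
    exact {
      body := hbody1
      r12 := by
        rw [w_kept.get .r12 rfl]
        exact hr12
    }
  · -- 0x108e78 FROM 0x108eab: the word failed, `r13d = 0`
    refine ReachVia.done (Or.inr ?_)
    refine gih1_done_of_fail hbody w_mem w_rip w_rsp (w_kept.get .rbx rfl) (w_kept.get .rbp rfl) w_r13
      (ProgX.Base.conv_code_in w_eq) ?_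
    refine ProgX.Base.abiInv_of ?_ ?_
    · rw [w_flags]
      simp only [X86.User.df_setStatus]
      exact hdf
    · rw [w_mxcsr]
      exact hmx

/-- **108EB9H (ret5) … 108EC9H (ret6) or the epilogue's cut 108E78H** (dgif_lib.c:373-374): `test eax, eax`; GIF_ERROR: `r13d = 0`
(108EA5H) and to the epilogue; otherwise `DGifGetWord(gif, &gif->Image.Width)` (`gif + 48`). -/
theorem gih1_seg_third (Lay : Layout) (hLay : Lay.hi = 0x1000000) (μ : Microarch) (hμ : UserX.MicroOK μ) (u₀ : State)
    (hcode : HasCodeNat Lay u₀ Gif.L.DGifGetImageHeader.entry Gif.Code.code_DGifGetImageHeader.nat Gif.L.DGifGetImageHeader.size)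
    (H : Heap) (rest : List Obj) (frames : List (Nat × FrameLayout)) (F : Forest) (R : Rd) (e : State) (ret : Word)
    (h_DGifGetWord : Calls Lay μ ProgX.Base.WayInv (ProgX.Base.conv u₀) Gif.L.DGifGetWord.entry
      (Gif.Spec.DGifGetWord.spec H rest (DGifGetImageHeader.framesIn frames e) F R))
    (v : State) (hat : DGifGetImageHeader.Mid Gif.L.DGifGetImageHeader.ret5 H rest frames F R H F u₀ e ret v) :
    ReachVia Lay μ ProgX.Base.WayInv v (fun w =>
      DGifGetImageHeader.Mid Gif.L.DGifGetImageHeader.ret6 H rest frames F R H F u₀ e ret w ∨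
      DGifGetImageHeader.Done H rest frames F R H F u₀ e ret w) := by
  -- THE PRELUDE, as in `gih1_seg_first`; `eax` as a variable `z` (the branch fact of `test eax, eax` speaks of it)
  obtain ⟨hbody, hr12⟩ := hat
  have he := hbody.entry
  v_entry he
  obtain ⟨henv, hrdi⟩ := hbody.pre
  have w_rip := hbody.rip
  have c_rsp : v.reg .rsp = e.reg .rsp - 136 := hbody.rsp
  have c_rbx : v.reg .rbx = e.reg .rdi := hbody.rbx
  obtain ⟨z, c_rax⟩ : ∃ z, v.reg .rax = z := ⟨_, rfl⟩
  have w_kept : RegsKept [.rsp] v v := RegsKept.refl _ _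
  have w_eq : Mem.EqOn ProgX.Base.L.textLo ProgX.Base.L.textHi u₀.mem v.mem := ProgX.Base.conv_code_eqOn hbody.code
  have hdf := (show abiInv _ from hbody.abi).1
  have hmx := (show abiInv _ from hbody.abi).2
  have hsse := ProgX.Base.sseOK_of_abiInv hbody.abi
  have hcur := henv.ctx.cursor_range henv.heap.inv.shadow
  have hgin := henv.ok.owns.inside henv.heap.inv.heap (o := (F.gif, 120)) List.mem_cons_self
  have hbase := henv.heap.base
  simp only at hgin
  rw [hbase] at hgin
  have hg_lo : 8388608 + 64 ≤ F.gif := hgin.1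
  have hg_hi : F.gif + 120 + 32 ≤ 12582912 := hgin.2.2.2.2
  clear hgin
  -- THE WALK, both arms (`je`: the failed word comes first)
  u_walk hcode [hμ.vendor] until [Gif.L.DGifGetImageHeader.ret6, Gif.L.DGifGetImageHeader.at_108e78]
    span [ProgX.Base.L.textLo, ProgX.Base.L.textHi] side (v_side)
  case call_inv =>
    v_inv
  case pre_108ec4 =>
    -- DGifGetWord's precondition: `rdi = gif`, `rsi = &gif->Image.Width` = gif + 48
    exact gih1_word_pre Lay hLay hbody w_mem w_rsp w_rdi w_rsi (by u_omega) (by u_omega)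
  · -- 0x108e78 FROM 0x108eab: the word failed, `r13d = 0`
    refine ReachVia.done (Or.inr ?_)
    refine gih1_done_of_fail hbody w_mem w_rip w_rsp (w_kept.get .rbx rfl) (w_kept.get .rbp rfl) w_r13
      (ProgX.Base.conv_code_in w_eq) ?_
    refine ProgX.Base.abiInv_of ?_ ?_
    · rw [w_flags]
      simp only [X86.User.df_setStatus]
      exact hdf
    · rw [w_mxcsr]
      exact hmx
  · -- 0x108ec9 (ret6): DGIFGETWORD HAS RETURNED
    obtain ⟨hback, _, _, _⟩ := w_post
    -- the callee's footprint in terms of `v`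
    v_after_call w_rsp_108ec4 w_mem_108ec4
    simp only [w_rsi_108ec4] at w_same
    -- `Body` again at ret6, and `r12 = Private` still
    have hbody1 : DGifGetImageHeader.Body Gif.L.DGifGetImageHeader.ret6 H rest frames F R H F u₀ e ret s_108ec4r :=
      gih1_body_after_word Lay hLay hbody w_mem_108ec4 w_rsp_108ec4 (by u_omega) (by u_omega) w_same hback w_rip w_rsp
        (w_kept.get .rbx rfl) (w_kept.get .rbp rfl) w_code w_inv
    refine ReachVia.done (Or.inl ?_)
    exact {
      body := hbody1
      r12 := by
        rw [w_kept.get .r12 rfl]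
        exact hr12
    }

/-- **108EC9H (ret6) … the cut 108ECDH or the epilogue's cut 108E78H** (dgif_lib.c:374): `test eax, eax`; GIF_ERROR: `r13d = 0`
(108EA5H) and to the epilogue; otherwise on to the fourth word: nothing stored, `r12 = Private` still. -/
theorem gih1_seg_fourth (Lay : Layout) (hLay : Lay.hi = 0x1000000) (μ : Microarch) (hμ : UserX.MicroOK μ) (u₀ : State)
    (hcode : HasCodeNat Lay u₀ Gif.L.DGifGetImageHeader.entry Gif.Code.code_DGifGetImageHeader.nat Gif.L.DGifGetImageHeader.size)
    (H : Heap) (rest : List Obj) (frames : List (Nat × FrameLayout)) (F : Forest) (R : Rd) (e : State) (ret : Word)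
    (v : State) (hat : DGifGetImageHeader.Mid Gif.L.DGifGetImageHeader.ret6 H rest frames F R H F u₀ e ret v) :
    ReachVia Lay μ ProgX.Base.WayInv v (fun w =>
      DGifGetImageHeader.Mid Gif.L.DGifGetImageHeader.at_108ecd H rest frames F R H F u₀ e ret w ∨
      DGifGetImageHeader.Done H rest frames F R H F u₀ e ret w) := by
  -- THE PRELUDE, as in `gih1_seg_second` (no store, no call: no numbers needed)
  obtain ⟨hbody, hr12⟩ := hat
  have he := hbody.entry
  v_entry he
  have w_rip := hbody.rip
  have c_rsp : v.reg .rsp = e.reg .rsp - 136 := hbody.rsp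
  obtain ⟨z, c_rax⟩ : ∃ z, v.reg .rax = z := ⟨_, rfl⟩
  have w_kept : RegsKept [.rsp] v v := RegsKept.refl _ _
  have w_eq : Mem.EqOn ProgX.Base.L.textLo ProgX.Base.L.textHi u₀.mem v.mem := ProgX.Base.conv_code_eqOn hbody.code
  have hdf := (show abiInv _ from hbody.abi).1
  have hmx := (show abiInv _ from hbody.abi).2
  have hsse := ProgX.Base.sseOK_of_abiInv hbody.abi
  -- THE WALK, both arms (`je`: the failed word comes first)
  u_walk hcode [hμ.vendor] until [Gif.L.DGifGetImageHeader.at_108ecd, Gif.L.DGifGetImageHeader.at_108e78]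
    span [ProgX.Base.L.textLo, ProgX.Base.L.textHi] side (v_side)
  · -- 0x108e78 FROM 0x108eab: the word failed, `r13d = 0`
    refine ReachVia.done (Or.inr ?_)
    refine gih1_done_of_fail hbody w_mem w_rip w_rsp (w_kept.get .rbx rfl) (w_kept.get .rbp rfl) w_r13
      (ProgX.Base.conv_code_in w_eq) ?_
    refine ProgX.Base.abiInv_of ?_ ?_
    · rw [w_flags]
      simp only [X86.User.df_setStatus]
      exact hdf
    · rw [w_mxcsr]
      exact hmx
  · -- 0x108ecd: three words read; `Mid` there
    refine ReachVia.done (Or.inl ?_)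
    have hbody1 : DGifGetImageHeader.Body Gif.L.DGifGetImageHeader.at_108ecd H rest frames F R H F u₀ e ret s_108ecb := by
      refine gih1_body_moved hbody w_mem w_rip w_rsp (w_kept.get .rbx rfl) (w_kept.get .rbp rfl)
        (ProgX.Base.conv_code_in w_eq) ?_
      refine ProgX.Base.abiInv_of ?_ ?_
      · rw [w_flags]
        simp only [X86.User.df_setStatus]
        exact hdf
      · rw [w_mxcsr]
        exact hmx
    exact {
      body := hbody1
      r12 := by
        rw [w_kept.get .r12 rfl]
        exact hr12
    }

end Gif.Spec.DGifGetImageHeader_1
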